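-- pv_equiv track=rewrite | github.com/abstra-app/hackerforms-lib | hackerforms/automation/parser/docs_parser_old.py | get_position_args_from_docs
-- ===== SOURCE A (Python) =====
-- from typing import Dict, List, Optional
--
-- POSITIONAL_ARGS_SECTION = "Positional Args:"
--
-- KEYWORD_ARGS_SECTION = "Keyword Args:"
--
-- def get_position_args_from_docs(docs: List[str]) -> List[str]:
--     positional_args = []
--     current = 0
--     positional_not_found = True
--
--     while current < len(docs):
--         if positional_not_found and not docs[current].startswith(
--             POSITIONAL_ARGS_SECTION
--         ):
--             current += 1
--             continue
--
--         if docs[current].startswith(POSITIONAL_ARGS_SECTION):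
--             positional_not_found = False
--             current += 1
--             continue
--
--         if docs[current].startswith(KEYWORD_ARGS_SECTION):
--             break
--
--         positional_args.append(docs[current])
--         current += 1
--
--     return positional_args
-- ===== SOURCE B (Python) =====
-- POSITIONAL_ARGS_SECTION = "Positional Args:"
-- KEYWORD_ARGS_SECTION = "Keyword Args:"
--
--
-- def get_position_args_from_docs(docs):
--     start = next(
--         (i for i, line in enumerate(docs) if line.startswith(POSITIONAL_ARGS_SECTION)),
--         None,
--     )
--     if start is None:
--         return []
--     tail = docs[start + 1:]
--     end = next(
--         (j for j, line in enumerate(tail) if line.startswith(KEYWORD_ARGS_SECTION)),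
--         len(tail),
--     )
--     return [line for line in tail[:end]
--             if not line.startswith(POSITIONAL_ARGS_SECTION)]
-- ===== Notes on version B (the rewrite author's own statement) =====
-- stated objective: simpler
-- what changed: Replaced the flag-driven while loop with a two-phase pipeline: locate the section start and end indices, then slice and filter that region.
import Mathlib
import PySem

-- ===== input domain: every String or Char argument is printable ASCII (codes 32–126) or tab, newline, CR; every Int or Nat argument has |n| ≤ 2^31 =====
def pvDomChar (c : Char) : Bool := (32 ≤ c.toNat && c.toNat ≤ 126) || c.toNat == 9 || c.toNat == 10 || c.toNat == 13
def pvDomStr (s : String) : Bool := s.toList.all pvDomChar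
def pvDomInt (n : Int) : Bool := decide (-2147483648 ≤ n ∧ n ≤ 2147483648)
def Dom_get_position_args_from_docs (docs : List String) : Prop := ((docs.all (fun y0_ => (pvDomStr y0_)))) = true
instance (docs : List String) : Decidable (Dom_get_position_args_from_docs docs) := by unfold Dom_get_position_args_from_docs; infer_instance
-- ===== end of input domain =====

-- B replaces A's flag-driven while loop by locate-boundaries-then-slice-and-filter (simpler decomposition, same cost).

def pvPOS : String := "Positional Args:"
def pvKEY : String := "Keyword Args:"

-- ===== PORT A =====
-- A's while loop over `current` with the `positional_not_found` flag, as structural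
-- recursion over the remaining suffix of docs; the appends become conses.
def pvLoopA : List String → Bool → List String
  | [], _ => []
  | d :: rest, notFound =>
    if notFound && !(PySem.Str.startswith d pvPOS) then pvLoopA rest notFound
    else if PySem.Str.startswith d pvPOS then pvLoopA rest false
    else if PySem.Str.startswith d pvKEY then []
    else d :: pvLoopA rest notFound

def get_position_args_from_docs (docs : List String) : List String :=
  pvLoopA docs true

-- ===== PORT B =====
-- docs[start+1:] and tail[:end] are slices with nonnegative in-range bounds, exactly List.drop/List.take.
def get_position_args_from_docs_alt (docs : List String) : List String :=
  match docs.findIdx? (fun l => PySem.Str.startswith l pvPOS) with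
  | none => []
  | some start =>
    let tail := docs.drop (start + 1)
    let e := (tail.findIdx? (fun l => PySem.Str.startswith l pvKEY)).getD tail.length
    (tail.take e).filter (fun l => !(PySem.Str.startswith l pvPOS))

-- ===== PRECONDITION & SPEC =====
def Spec_get_position_args_from_docs (docs : List String) (out : List String) : Prop := out = get_position_args_from_docs_alt docs
instance (docs : List String) (out : List String) : Decidable (Spec_get_position_args_from_docs docs out) := by unfold Spec_get_position_args_from_docs; infer_instance

-- ===== CLAIM (what is proved, stated in full; the proofs are below) =====
def Claim_equal_get_position_args_from_docs : Prop := ∀ (docs : List String), Dom_get_position_args_from_docs docs → Spec_get_position_args_from_docs docs (get_position_args_from_docs docs)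

-- ===== LEMMAS AND PROOFS =====

-- No line starts with both section headers (they differ at the first character).
theorem pv_not_both (d : String) (h : PySem.Chars.startswith d.toList pvPOS.toList = true) :
    PySem.Chars.startswith d.toList pvKEY.toList = false := by
  by_contra hk
  rw [Bool.not_eq_false] at hk
  rw [PySem.Chars.startswith_iff] at h hk
  rcases h with ⟨t1, h1⟩
  rcases hk with ⟨t2, h2⟩
  have : pvPOS.toList ++ t1 = pvKEY.toList ++ t2 := by rw [h1, h2]
  simp [pvPOS, pvKEY] at this

-- After the header has been seen (flag false), the loop returns the prefix of the
-- suffix up to the first keyword header, with repeated positional headers filtered out.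
theorem pv_loop_false (rest : List String) :
    pvLoopA rest false =
      (rest.take ((rest.findIdx? (fun l => PySem.Str.startswith l pvKEY)).getD rest.length)).filter
        (fun l => !(PySem.Str.startswith l pvPOS)) := by
  induction rest with
  | nil => simp [pvLoopA]
  | cons d rest ih =>
    by_cases hp : PySem.Chars.startswith d.toList pvPOS.toList = true
    · have hk := pv_not_both d hp
      simp [pvLoopA, hp, hk, List.findIdx?_cons, ih]
    · by_cases hk : PySem.Chars.startswith d.toList pvKEY.toList = true
      · simp [pvLoopA, hp, hk, List.findIdx?_cons]
      · simp [pvLoopA, hp, hk, List.findIdx?_cons, ih]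

-- With the flag still set, the loop scans for the first positional header and then behaves as pv_loop_false.
theorem pv_loop_true (docs : List String) :
    pvLoopA docs true = get_position_args_from_docs_alt docs := by
  induction docs with
  | nil => simp [pvLoopA, get_position_args_from_docs_alt]
  | cons d rest ih =>
    by_cases hp : PySem.Chars.startswith d.toList pvPOS.toList = true
    · simp [pvLoopA, hp, get_position_args_from_docs_alt, List.findIdx?_cons,
        pv_loop_false]
    · simp only [pvLoopA, get_position_args_from_docs_alt, List.findIdx?_cons,
        PySem.Str.startswith_eq, hp] at ih ⊢
      simp only [Bool.not_false, Bool.and_true, if_true, Bool.false_eq_true,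
        if_false, ih]
      cases h : List.findIdx? (fun l => PySem.Chars.startswith l.toList pvPOS.toList) rest with
      | none => simp
      | some i => simp [List.drop_succ_cons]

-- ===== VERDICT (by name: the statement is the Claim_ definition above) =====
theorem get_position_args_from_docs_spec : Claim_equal_get_position_args_from_docs := by
  intro docs _
  unfold Spec_get_position_args_from_docs get_position_args_from_docs
  exact pv_loop_true docs
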